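-- pv_equiv track=rewrite | github.com/DediGadot/Combat-Logger | improved_acmi_analyzer.py | can_carry_missile
-- ===== SOURCE A (Python) =====
-- def can_carry_missile(aircraft_type, missile_type):
--     """Check if an aircraft type can carry a specific missile type"""
--     # Simplified mapping - in reality this would be more complex
--     western_aircraft = ['F-16', 'F-4', 'F-18', 'FA-18']
--     eastern_aircraft = ['MiG-21', 'MiG-23', 'MiG-25', 'Su-27']
--     western_missiles = ['AIM_120', 'AIM-9L', 'AIM-9M', 'AIM-9X', 'AIM-7']
--     eastern_missiles = ['R-27', 'R-73', 'R-77', 'P_24R']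
--
--     is_western_aircraft = any(ac in aircraft_type for ac in western_aircraft)
--     is_eastern_aircraft = any(ac in aircraft_type for ac in eastern_aircraft)
--     is_western_missile = any(missile in missile_type for missile in western_missiles)
--     is_eastern_missile = any(missile in missile_type for missile in eastern_missiles)
--
--     return (is_western_aircraft and is_western_missile) or (is_eastern_aircraft and is_eastern_missile)
-- ===== SOURCE B (Python) =====
-- def can_carry_missile(aircraft_type, missile_type):
--     """Check if an aircraft type can carry a specific missile type"""
--     aircraft_faction = {'F-16': 'W', 'F-4': 'W', 'F-18': 'W', 'FA-18': 'W',
--                         'MiG-21': 'E', 'MiG-23': 'E', 'MiG-25': 'E', 'Su-27': 'E'}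
--     missile_faction = {'AIM_120': 'W', 'AIM-9L': 'W', 'AIM-9M': 'W',
--                        'AIM-9X': 'W', 'AIM-7': 'W',
--                        'R-27': 'E', 'R-73': 'E', 'R-77': 'E', 'P_24R': 'E'}
--     ac_factions = {f for s, f in aircraft_faction.items() if s in aircraft_type}
--     mi_factions = {f for s, f in missile_faction.items() if s in missile_type}
--     return not ac_factions.isdisjoint(mi_factions)
-- ===== Notes on version B (the rewrite author's own statement) =====
-- stated objective: alternative
-- what changed: Replaces A's four hard-coded any() flags and fixed boolean formula with substring-to-faction lookup tables: B collects the set of factions whose aircraft names occur in aircraft_type and the set of factions whose missile names occur in missile_type, and returns whether the two faction sets intersect.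
import Mathlib
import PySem

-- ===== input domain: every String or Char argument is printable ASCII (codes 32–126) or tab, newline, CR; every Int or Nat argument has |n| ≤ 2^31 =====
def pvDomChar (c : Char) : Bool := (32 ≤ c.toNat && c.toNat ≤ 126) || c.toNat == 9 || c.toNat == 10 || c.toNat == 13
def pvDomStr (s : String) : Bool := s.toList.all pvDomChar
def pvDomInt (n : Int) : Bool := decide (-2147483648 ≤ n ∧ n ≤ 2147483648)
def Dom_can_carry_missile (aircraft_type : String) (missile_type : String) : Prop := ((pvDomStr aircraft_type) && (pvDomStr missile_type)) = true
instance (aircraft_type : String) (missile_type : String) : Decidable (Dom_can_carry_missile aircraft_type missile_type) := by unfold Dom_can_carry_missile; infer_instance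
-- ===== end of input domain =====

-- B replaces A's four hard-coded any() flags with substring→faction maps: it collects the set of factions matching each argument and tests set intersection; same cost, different data structure.


-- ===== PORT A =====
-- Port of A: four any() flags over the literal lists, combined by the fixed formula.
def can_carry_missile (aircraft_type : String) (missile_type : String) : Bool :=
  let western_aircraft : List String := ["F-16", "F-4", "F-18", "FA-18"]
  let eastern_aircraft : List String := ["MiG-21", "MiG-23", "MiG-25", "Su-27"]
  let western_missiles : List String := ["AIM_120", "AIM-9L", "AIM-9M", "AIM-9X", "AIM-7"]
  let eastern_missiles : List String := ["R-27", "R-73", "R-77", "P_24R"]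
  let is_western_aircraft := western_aircraft.any (fun ac => PySem.Str.isIn ac aircraft_type)
  let is_eastern_aircraft := eastern_aircraft.any (fun ac => PySem.Str.isIn ac aircraft_type)
  let is_western_missile := western_missiles.any (fun missile => PySem.Str.isIn missile missile_type)
  let is_eastern_missile := eastern_missiles.any (fun missile => PySem.Str.isIn missile missile_type)
  (is_western_aircraft && is_western_missile) || (is_eastern_aircraft && is_eastern_missile)

-- ===== PORT B =====
-- Port of B: substring→faction maps; the set of factions matched by each argument; non-disjointness.
def can_carry_missile_alt (aircraft_type : String) (missile_type : String) : Bool :=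
  let aircraft_faction : List (String × String) :=
    [("F-16", "W"), ("F-4", "W"), ("F-18", "W"), ("FA-18", "W"),
     ("MiG-21", "E"), ("MiG-23", "E"), ("MiG-25", "E"), ("Su-27", "E")]
  let missile_faction : List (String × String) :=
    [("AIM_120", "W"), ("AIM-9L", "W"), ("AIM-9M", "W"), ("AIM-9X", "W"), ("AIM-7", "W"),
     ("R-27", "E"), ("R-73", "E"), ("R-77", "E"), ("P_24R", "E")]
  let ac_factions : PySem.Set String :=
    PySem.Set.ofList ((aircraft_faction.filter (fun p => PySem.Str.isIn p.1 aircraft_type)).map Prod.snd)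
  let mi_factions : PySem.Set String :=
    PySem.Set.ofList ((missile_faction.filter (fun p => PySem.Str.isIn p.1 missile_type)).map Prod.snd)
  !(PySem.Set.isdisjoint ac_factions mi_factions)

-- ===== PRECONDITION & SPEC =====
def Spec_can_carry_missile (aircraft_type : String) (missile_type : String) (out : Bool) : Prop := out = can_carry_missile_alt aircraft_type missile_type
instance (aircraft_type : String) (missile_type : String) (out : Bool) : Decidable (Spec_can_carry_missile aircraft_type missile_type out) := by unfold Spec_can_carry_missile; infer_instance

-- ===== CLAIM =====
def Claim_equal_can_carry_missile : Prop := ∀ (aircraft_type : String) (missile_type : String), Dom_can_carry_missile aircraft_type missile_type → Spec_can_carry_missile aircraft_type missile_type (can_carry_missile aircraft_type missile_type)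

-- ===== LEMMAS AND PROOFS =====

-- ===== VERDICT =====
theorem can_carry_missile_spec : Claim_equal_can_carry_missile := by
  intro aircraft_type missile_type _
  unfold Spec_can_carry_missile can_carry_missile can_carry_missile_alt
  rw [Bool.eq_iff_iff]
  simp only [List.any_cons, List.any_nil, Bool.or_eq_true, Bool.and_eq_true,
    Bool.not_eq_true', Bool.eq_false_iff, Ne, PySem.Set.isdisjoint_iff,
    PySem.Set.mem_ofList, List.mem_map, List.mem_filter, List.mem_cons,
    List.not_mem_nil, Prod.exists]
  push Not
  constructor
  · rintro (⟨ha, hm⟩ | ⟨ha, hm⟩)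
    · refine ⟨"W", ?_, ?_⟩
      rcases ha with h|h|h|h|h
      · exact ⟨"F-16", "W", ⟨by tauto, h⟩, rfl⟩
      · exact ⟨"F-4", "W", ⟨by tauto, h⟩, rfl⟩
      · exact ⟨"F-18", "W", ⟨by tauto, h⟩, rfl⟩
      · exact ⟨"FA-18", "W", ⟨by tauto, h⟩, rfl⟩
      · simp at h
      rcases hm with h|h|h|h|h|h
      · exact ⟨"AIM_120", "W", ⟨by tauto, h⟩, rfl⟩
      · exact ⟨"AIM-9L", "W", ⟨by tauto, h⟩, rfl⟩
      · exact ⟨"AIM-9M", "W", ⟨by tauto, h⟩, rfl⟩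
      · exact ⟨"AIM-9X", "W", ⟨by tauto, h⟩, rfl⟩
      · exact ⟨"AIM-7", "W", ⟨by tauto, h⟩, rfl⟩
      · simp at h
    · refine ⟨"E", ?_, ?_⟩
      rcases ha with h|h|h|h|h
      · exact ⟨"MiG-21", "E", ⟨by tauto, h⟩, rfl⟩
      · exact ⟨"MiG-23", "E", ⟨by tauto, h⟩, rfl⟩
      · exact ⟨"MiG-25", "E", ⟨by tauto, h⟩, rfl⟩
      · exact ⟨"Su-27", "E", ⟨by tauto, h⟩, rfl⟩
      · simp at h
      rcases hm with h|h|h|h|h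
      · exact ⟨"R-27", "E", ⟨by tauto, h⟩, rfl⟩
      · exact ⟨"R-73", "E", ⟨by tauto, h⟩, rfl⟩
      · exact ⟨"R-77", "E", ⟨by tauto, h⟩, rfl⟩
      · exact ⟨"P_24R", "E", ⟨by tauto, h⟩, rfl⟩
      · simp at h
  · rintro ⟨f, ⟨a, b, ⟨ha, hina⟩, rfl⟩, c, d, ⟨hc, hinc⟩, hdb⟩
    rcases ha with h|h|h|h|h|h|h|h|h <;>
      rcases hc with h'|h'|h'|h'|h'|h'|h'|h'|h'|h' <;>
        simp_all
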